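-- pv_equiv track=rewrite | github.com/PauloCesar-dev404/m3u8_analyzer | m3u8_analyzer/M3u8Analyzer.py | get_player_playlist
-- ===== SOURCE A (Python) =====
-- def get_player_playlist(m3u8_url: str) -> str:
--     """
--     Obtém o caminho do diretório base do arquivo M3U8, excluindo o nome do arquivo.
--
--     :param m3u8_url: URL completa do arquivo M3U8.
--     :return: Caminho do diretório onde o arquivo M3U8 está localizado.
--     """
--     if m3u8_url.endswith('/'):
--         m3u8_url = m3u8_url[:-1]
--     partes = m3u8_url.split('/')
--     for i, parte in enumerate(partes):
--         if '.m3u8' in parte: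
--             return '/'.join(partes[:i]) + "/"
--     return ''
-- ===== SOURCE B (Python) =====
-- def get_player_playlist(m3u8_url: str) -> str:
--     """
--     Obtém o caminho do diretório base do arquivo M3U8, excluindo o nome do arquivo.
--     """
--     if m3u8_url.endswith('/'):
--         m3u8_url = m3u8_url[:-1]
--     idx = m3u8_url.find('.m3u8')
--     if idx == -1:
--         return ''
--     j = m3u8_url.rfind('/', 0, idx)
--     if j == -1:
--         return '/'
--     return m3u8_url[:j + 1]
-- ===== Notes on version B (the rewrite author's own statement) =====
-- stated objective: simpler
-- what changed: Instead of splitting the URL into path segments, scanning them for the one containing the playlist extension and re-joining the prefix segments, B locates the extension with find, takes the last separator before it with rfind, and returns a single slice of the raw string.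
import Mathlib
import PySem

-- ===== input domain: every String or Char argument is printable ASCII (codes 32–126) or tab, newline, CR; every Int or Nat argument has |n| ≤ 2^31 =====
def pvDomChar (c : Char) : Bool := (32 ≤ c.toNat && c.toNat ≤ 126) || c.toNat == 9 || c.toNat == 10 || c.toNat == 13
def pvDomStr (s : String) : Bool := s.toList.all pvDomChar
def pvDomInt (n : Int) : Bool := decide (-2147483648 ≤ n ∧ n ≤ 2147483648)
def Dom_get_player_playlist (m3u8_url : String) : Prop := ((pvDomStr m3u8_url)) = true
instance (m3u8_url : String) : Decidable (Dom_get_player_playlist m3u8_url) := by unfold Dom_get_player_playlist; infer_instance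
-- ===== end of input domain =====

-- B replaces A's split('/')-scan-and-rejoin pipeline by two index searches (find the first
-- '.m3u8', rfind the '/' before it) and a single slice of the raw string: simpler, no
-- intermediate list of parts.  Both ports work on the code-point list (PySem.Chars is what
-- PySem.Str wraps), exact for Python str on the ASCII domain.

-- ===== PORT A =====
-- the pattern '.m3u8'
def pvPat : List Char := ['.', 'm', '3', 'u', '8']

-- for i, parte in enumerate(partes): if '.m3u8' in parte: return '/'.join(partes[:i]) + "/"
def pvAloop (partes : List (List Char)) : List (Int × List Char) → List Char
  | [] => []                              -- loop fell through: return ''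
  | (i, parte) :: rest =>
      if PySem.Chars.isIn pvPat parte
      then PySem.Chars.join ['/'] (PySem.List.slice partes none (some i)) ++ ['/']
      else pvAloop partes rest

def get_player_playlist (m3u8_url : String) : String :=
  let s0 := m3u8_url.toList
  -- if m3u8_url.endswith('/'): m3u8_url = m3u8_url[:-1]
  let s := if PySem.Chars.endswith s0 ['/'] then PySem.List.slice s0 none (some (-1)) else s0
  -- partes = m3u8_url.split('/')
  let partes := PySem.Chars.splitOn s ['/']
  String.ofList (pvAloop partes (PySem.List.enumerate partes 0))

-- ===== PORT B =====
def pvBcore (s : List Char) : List Char :=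
  -- idx = m3u8_url.find('.m3u8')
  let idx := PySem.Chars.find s pvPat
  if idx = -1 then []                     -- return ''
  else
    -- j = m3u8_url.rfind('/', 0, idx)
    let j := PySem.Chars.rfindFrom s ['/'] 0 (some idx)
    if j = -1 then ['/']                  -- return '/'
    else PySem.List.slice s none (some (j + 1))   -- return m3u8_url[:j + 1]

def get_player_playlist_alt (m3u8_url : String) : String :=
  let s0 := m3u8_url.toList
  -- if m3u8_url.endswith('/'): m3u8_url = m3u8_url[:-1]
  let s := if PySem.Chars.endswith s0 ['/'] then PySem.List.slice s0 none (some (-1)) else s0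
  String.ofList (pvBcore s)

-- ===== PRECONDITION & SPEC =====
def Spec_get_player_playlist (m3u8_url : String) (out : String) : Prop := out = get_player_playlist_alt m3u8_url
instance (m3u8_url : String) (out : String) : Decidable (Spec_get_player_playlist m3u8_url out) := by unfold Spec_get_player_playlist; infer_instance

-- ===== CLAIM (what is proved, stated in full; the proofs are below) =====
def Claim_equal_get_player_playlist : Prop := ∀ (m3u8_url : String), Dom_get_player_playlist m3u8_url → Spec_get_player_playlist m3u8_url (get_player_playlist m3u8_url)

-- ===== LEMMAS AND PROOFS =====

-- first-match structure of A's loop: the parts before the first part containing '.m3u8'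
def pvAFirst : List (List Char) → Option (List (List Char))
  | [] => none
  | p :: ps => if PySem.Chars.isIn pvPat p then some [] else (pvAFirst ps).map (p :: ·)

-- what A computes on the (stripped) character list
def pvAcore (s : List Char) : List Char :=
  match pvAFirst (PySem.Chars.splitOn s ['/']) with
  | none => []
  | some l => PySem.Chars.join ['/'] l ++ ['/']

theorem pvAloop_eq (rem pre : List (List Char)) :
    pvAloop (pre ++ rem) (PySem.List.enumerate rem (pre.length : Int)) =
      match pvAFirst rem with
      | none => []
      | some l => PySem.Chars.join ['/'] (pre ++ l) ++ ['/'] := by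
  induction rem generalizing pre with
  | nil => simp [pvAloop, pvAFirst, PySem.List.enumerate]
  | cons p ps ih =>
    rw [PySem.List.enumerate_cons]
    show (if PySem.Chars.isIn ['.', 'm', '3', 'u', '8'] p then _ else pvAloop (pre ++ p :: ps) (PySem.List.enumerate ps ((pre.length : Int) + 1))) = _
    by_cases h : PySem.Chars.isIn ['.', 'm', '3', 'u', '8'] p
    · have hsl : PySem.List.slice (pre ++ p :: ps) none (some (pre.length : Int)) = pre := by
        rw [PySem.List.slice_to_natCast]
        exact List.take_left
      simp [h, hsl, pvAFirst, pvPat]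
    · have h2 : ((pre.length : Int) + 1) = (((pre ++ [p]).length : Nat) : Int) := by
        simp
      rw [h2]
      have := ih (pre ++ [p])
      rw [List.append_assoc] at this
      simp only [List.singleton_append] at this
      rw [this]
      cases hq : pvAFirst ps with
      | none => simp [pvAFirst, pvPat, h, hq]
      | some l => simp [pvAFirst, pvPat, h, hq, List.append_assoc]

-- a pattern that contains no '/' cannot occur at or before the separating '/' unless it occurs in seg
theorem pvNoEarly (sub seg rest : List Char) (hslash : ('/' : Char) ∉ sub)
    (hseg : ¬ sub <:+: seg) :
    ∀ i ≤ seg.length, ¬ sub <+: (seg ++ '/' :: rest).drop i := by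
  intro i hi hpre
  rw [List.drop_append_of_le_length hi] at hpre
  set X := seg.drop i with hX
  by_cases hl : sub.length ≤ X.length
  · have htake : sub = (X ++ '/' :: rest).take sub.length := List.prefix_iff_eq_take.mp hpre
    rw [List.take_append_of_le_length hl] at htake
    have : sub <+: X := htake ▸ List.take_prefix _ _
    exact hseg (this.isInfix.trans (List.drop_suffix i seg).isInfix)
  · push_neg at hl
    have h1 : sub[X.length] = (X ++ '/' :: rest)[X.length]'(by simp) := hpre.getElem hl
    have h2 : (X ++ '/' :: rest)[X.length]'(by simp) = '/' := by
      rw [List.getElem_append_right (Nat.le_refl _)]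
      simp
    have h3 : sub[X.length] = '/' := h1.trans h2
    exact hslash (h3 ▸ List.getElem_mem hl)

theorem pvShift (seg rest : List Char) (i : Nat) (hi : seg.length < i) :
    (seg ++ '/' :: rest).drop i = rest.drop (i - seg.length - 1) := by
  rw [List.drop_append, List.drop_of_length_le (by omega), List.nil_append]
  have h2 : i - seg.length = (i - seg.length - 1) + 1 := by omega
  rw [h2, List.drop_succ_cons]
  congr 1

-- find equals n if there is an occurrence at n and none before
theorem pvFindUnique (cs sub : List Char) (n : Nat) (h1 : sub <+: cs.drop n)
    (h2 : ∀ i < n, ¬ sub <+: cs.drop i) : PySem.Chars.find cs sub = (n : Int) := by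
  have hinf : sub <:+: cs :=
    (PySem.Chars.isIn_iff_infix sub cs).mp ((PySem.Chars.exists_prefix_drop_iff_isIn sub cs).mp ⟨n, h1⟩)
  have hnn : 0 ≤ PySem.Chars.find cs sub := (PySem.Chars.find_nonneg_iff cs sub).mpr hinf
  obtain ⟨hocc, hmin⟩ := PySem.Chars.find_spec hnn
  rcases Nat.lt_trichotomy (PySem.Chars.find cs sub).toNat n with h | h | h
  · exact absurd hocc (h2 _ h)
  · omega
  · exact absurd h1 (hmin n h)

theorem pvRgoZero (s sub : List Char) :
    PySem.Chars.rfind.go s sub 0 = if sub.isPrefixOf s then (0 : Int) else -1 := by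
  rw [PySem.Chars.rfind.go.eq_def]

theorem pvRgoSucc (s sub : List Char) (j : Nat) :
    PySem.Chars.rfind.go s sub (j + 1) =
      if sub.isPrefixOf (s.drop (j + 1)) then ((j + 1 : Nat) : Int) else PySem.Chars.rfind.go s sub j := by
  rw [PySem.Chars.rfind.go.eq_def]

theorem pvRgoNone (s sub : List Char) : ∀ (j : Nat), (∀ i ≤ j, ¬ sub <+: s.drop i) →
    PySem.Chars.rfind.go s sub j = -1 := by
  intro j
  induction j with
  | zero =>
    intro h
    rw [pvRgoZero]
    simp only [← List.isPrefixOf_iff_prefix] at h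
    have := h 0 (Nat.le_refl 0)
    simp at this
    simp [this]
  | succ k ih =>
    intro h
    rw [pvRgoSucc]
    have h1 : ¬ sub <+: s.drop (k + 1) := h (k + 1) (Nat.le_refl _)
    rw [← List.isPrefixOf_iff_prefix] at h1
    simp only [Bool.not_eq_true] at h1
    rw [h1]
    simp
    exact ih (fun i hi => h i (Nat.le_succ_of_le hi))

theorem pvRgoEq (s sub : List Char) (n : Nat) (hocc : sub <+: s.drop n) :
    ∀ (j : Nat), n ≤ j → (∀ i, n < i → i ≤ j → ¬ sub <+: s.drop i) →
    PySem.Chars.rfind.go s sub j = (n : Int) := by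
  intro j
  induction j with
  | zero =>
    intro hnj _
    interval_cases n
    rw [pvRgoZero]
    simp at hocc
    rw [← List.isPrefixOf_iff_prefix] at hocc
    simp [hocc]
  | succ k ih =>
    intro hnj hmax
    rw [pvRgoSucc]
    by_cases he : n = k + 1
    · subst he
      rw [← List.isPrefixOf_iff_prefix] at hocc
      simp [hocc]
    · have hlt : n ≤ k := by omega
      have h1 : ¬ sub <+: s.drop (k + 1) := hmax (k + 1) (by omega) (Nat.le_refl _)
      rw [← List.isPrefixOf_iff_prefix] at h1
      simp only [Bool.not_eq_true] at h1
      rw [h1]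
      simp
      exact ih hlt (fun i hi1 hi2 => hmax i hi1 (Nat.le_succ_of_le hi2))

theorem pvRfindNone (l : List Char) (h : ('/' : Char) ∉ l) :
    PySem.Chars.rfind l ['/'] = -1 := by
  unfold PySem.Chars.rfind
  apply pvRgoNone
  intro i _ hpre
  exact h (List.drop_subset i l (hpre.subset List.mem_cons_self))

theorem pvRfindAppend (xs ys : List Char) :
    PySem.Chars.rfind (xs ++ '/' :: ys) ['/'] = (xs.length : Int) + 1 + PySem.Chars.rfind ys ['/'] := by
  by_cases hy : ('/' : Char) ∈ ys
  · obtain ⟨i, hi, hget⟩ := List.mem_iff_getElem.mp hy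
    set P : Nat → Prop := fun i => ['/'] <+: ys.drop i with hP
    have hPi : P i := by
      rw [hP]
      simp only
      rw [List.drop_eq_getElem_cons hi, hget]
      exact ⟨_, rfl⟩
    have hdec : DecidablePred P := fun i => by rw [hP]; infer_instance
    set n := Nat.findGreatest P ys.length with hn
    have hPn : P n := Nat.findGreatest_spec (Nat.le_of_lt hi) hPi
    have hnle : n ≤ ys.length := Nat.findGreatest_le _
    have hmax : ∀ k, n < k → k ≤ ys.length → ¬ P k := fun k h1 h2 => Nat.findGreatest_is_greatest h1 h2
    have hys : PySem.Chars.rfind ys ['/'] = (n : Int) := by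
      unfold PySem.Chars.rfind
      exact pvRgoEq ys ['/'] n hPn ys.length hnle hmax
    have hcs : PySem.Chars.rfind (xs ++ '/' :: ys) ['/'] = ((xs.length + 1 + n : Nat) : Int) := by
      unfold PySem.Chars.rfind
      apply pvRgoEq
      · rw [pvShift xs ys _ (by omega)]
        have : xs.length + 1 + n - xs.length - 1 = n := by omega
        rw [this]
        exact hPn
      · simp; omega
      · intro i hi1 hi2 hpre
        rw [pvShift xs ys i (by omega)] at hpre
        exact hmax (i - xs.length - 1) (by omega) (by simp at hi2; omega) hpre
    rw [hcs, hys]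
    push_cast
    ring
  · rw [pvRfindNone ys hy]
    unfold PySem.Chars.rfind
    have : PySem.Chars.rfind.go (xs ++ '/' :: ys) ['/'] (xs ++ '/' :: ys).length = ((xs.length : Nat) : Int) := by
      apply pvRgoEq
      · rw [List.drop_left]
        exact ⟨ys, rfl⟩
      · simp
      · intro i hi1 hi2 hpre
        rw [pvShift xs ys i hi1] at hpre
        exact hy (List.drop_subset _ ys (hpre.subset List.mem_cons_self))
    rw [this]
    ring

theorem pvRfindVal (ys : List Char) (hy : ('/' : Char) ∈ ys) :
    PySem.Chars.rfind ys ['/'] = ((Nat.findGreatest (fun i => ['/'] <+: ys.drop i) ys.length : Nat) : Int) := by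
  obtain ⟨i, hi, hget⟩ := List.mem_iff_getElem.mp hy
  have hPi : ['/'] <+: ys.drop i := by
    rw [List.drop_eq_getElem_cons hi, hget]
    exact ⟨_, rfl⟩
  unfold PySem.Chars.rfind
  have hspec : ['/'] <+: ys.drop (Nat.findGreatest (fun i => ['/'] <+: ys.drop i) ys.length) :=
    Nat.findGreatest_spec (P := fun i => ['/'] <+: ys.drop i) (Nat.le_of_lt hi) hPi
  exact pvRgoEq ys ['/'] _ hspec ys.length
    (Nat.findGreatest_le _) (fun k h1 h2 => Nat.findGreatest_is_greatest h1 h2)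

theorem pvRfindGe (l : List Char) : -1 ≤ PySem.Chars.rfind l ['/'] := by
  by_cases h : ('/' : Char) ∈ l
  · rw [pvRfindVal l h]; omega
  · rw [pvRfindNone l h]

theorem pvRfindFromTake (s : List Char) (idx : Int) (h0 : 0 ≤ idx) (hle : idx ≤ (s.length : Int)) :
    PySem.Chars.rfindFrom s ['/'] 0 (some idx) = PySem.Chars.rfind (s.take idx.toNat) ['/'] := by
  unfold PySem.Chars.rfindFrom
  simp only
  rw [if_neg (by omega : ¬ (s.length : Int) < idx)]
  rw [if_neg (by omega : ¬ idx < 0)]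
  rw [if_neg (by norm_num : ¬ (0:Int) < 0)]
  rw [if_neg (by omega : ¬ idx < (0:Int))]
  simp only [Int.toNat_zero, List.drop_zero]
  by_cases hr : PySem.Chars.rfind (List.take idx.toNat s) ['/'] = -1
  · rw [if_pos hr, hr]
  · rw [if_neg hr]
    ring

theorem pvFindAppend (sub seg rest : List Char) (hslash : ('/' : Char) ∉ sub)
    (hseg : ¬ sub <:+: seg) :
    PySem.Chars.find (seg ++ '/' :: rest) sub =
      if PySem.Chars.find rest sub = -1 then -1
      else (seg.length : Int) + 1 + PySem.Chars.find rest sub := by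
  by_cases hr : PySem.Chars.find rest sub = -1
  · rw [if_pos hr]
    rw [PySem.Chars.find_eq_neg_one_iff] at hr ⊢
    intro hinf
    obtain ⟨j, hj⟩ := (PySem.Chars.exists_prefix_drop_iff_isIn sub _).mpr
      ((PySem.Chars.isIn_iff_infix sub _).mpr hinf)
    by_cases hjs : j ≤ seg.length
    · exact pvNoEarly sub seg rest hslash hseg j hjs hj
    · rw [pvShift seg rest j (by omega)] at hj
      exact hr ((PySem.Chars.isIn_iff_infix sub rest).mp
        ((PySem.Chars.exists_prefix_drop_iff_isIn sub rest).mp ⟨_, hj⟩))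
  · rw [if_neg hr]
    have hnn : 0 ≤ PySem.Chars.find rest sub := by
      rcases lt_or_ge (PySem.Chars.find rest sub) 0 with h | h
      · exfalso
        apply hr
        rw [PySem.Chars.find_eq_neg_one_iff]
        intro hinf
        have := (PySem.Chars.find_nonneg_iff rest sub).mpr hinf
        omega
      · exact h
    obtain ⟨hocc, hmin⟩ := PySem.Chars.find_spec hnn
    set m := (PySem.Chars.find rest sub).toNat with hm
    have : PySem.Chars.find (seg ++ '/' :: rest) sub = ((seg.length + 1 + m : Nat) : Int) := by
      apply pvFindUnique
      · rw [pvShift seg rest _ (by omega)]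
        have he : seg.length + 1 + m - seg.length - 1 = m := by omega
        rw [he]
        exact hocc
      · intro i hi
        by_cases his : i ≤ seg.length
        · exact pvNoEarly sub seg rest hslash hseg i his
        · rw [pvShift seg rest i (by omega)]
          exact hmin _ (by omega)
    rw [this]
    push_cast
    omega

theorem pvFindInSeg (sub seg rest : List Char) (hne : sub ≠ []) (hseg : sub <:+: seg) :
    0 ≤ PySem.Chars.find (seg ++ '/' :: rest) sub ∧
      (PySem.Chars.find (seg ++ '/' :: rest) sub).toNat ≤ seg.length := by
  obtain ⟨j, hj⟩ := (PySem.Chars.exists_prefix_drop_iff_isIn sub seg).mpr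
    ((PySem.Chars.isIn_iff_infix sub seg).mpr hseg)
  have hjs : j ≤ seg.length := by
    by_contra h
    have : seg.drop j = [] := List.drop_eq_nil_of_le (by omega)
    rw [this, List.prefix_nil] at hj
    exact hne hj
  have hj2 : sub <+: (seg ++ '/' :: rest).drop j := by
    rw [List.drop_append_of_le_length hjs]
    exact hj.trans (List.prefix_append _ _)
  have hinf : sub <:+: (seg ++ '/' :: rest) :=
    (PySem.Chars.isIn_iff_infix sub _).mp ((PySem.Chars.exists_prefix_drop_iff_isIn sub _).mp ⟨j, hj2⟩)
  have hnn : 0 ≤ PySem.Chars.find (seg ++ '/' :: rest) sub :=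
    (PySem.Chars.find_nonneg_iff _ sub).mpr hinf
  refine ⟨hnn, ?_⟩
  obtain ⟨hocc, hmin⟩ := PySem.Chars.find_spec hnn
  by_contra h
  exact hmin j (by omega) hj2

theorem pvGoNoSep : ∀ (l : List Char) (fuel : Nat) (cur : List Char) (acc : List (List Char)),
    ('/' : Char) ∉ l → l.length ≤ fuel →
    PySem.Chars.splitOn.go ['/'] fuel l cur acc = ((cur.reverse ++ l) :: acc).reverse := by
  intro l
  induction l with
  | nil =>
    intro fuel cur acc _ _
    cases fuel <;> rw [PySem.Chars.splitOn.go.eq_def] <;> simp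
  | cons c rest ih =>
    intro fuel cur acc hmem hlen
    cases fuel with
    | zero => simp at hlen
    | succ f =>
      rw [PySem.Chars.splitOn.go.eq_def]
      have hc : c ≠ '/' := fun h => hmem (h ▸ List.mem_cons_self)
      have hpre : (['/'] : List Char).isPrefixOf (c :: rest) = false := by
        simp [List.isPrefixOf]
        exact fun h => absurd h.symm hc
      simp only [hpre]
      rw [ih f (c :: cur) acc (fun h => hmem (List.mem_cons_of_mem _ h)) (by simp at hlen; omega)]
      simp

theorem pvGoAcc : ∀ (fuel : Nat) (l cur : List Char) (acc : List (List Char)),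
    PySem.Chars.splitOn.go ['/'] fuel l cur acc = acc.reverse ++ PySem.Chars.splitOn.go ['/'] fuel l cur [] := by
  intro fuel
  induction fuel with
  | zero => intro l cur acc; rw [PySem.Chars.splitOn.go.eq_def, PySem.Chars.splitOn.go.eq_def]; simp
  | succ f ih =>
    intro l cur acc
    cases l with
    | nil => rw [PySem.Chars.splitOn.go.eq_def, PySem.Chars.splitOn.go.eq_def]; simp
    | cons c rest =>
      rw [PySem.Chars.splitOn.go.eq_def]
      conv_rhs => rw [PySem.Chars.splitOn.go.eq_def]
      by_cases hc : (['/'] : List Char).isPrefixOf (c :: rest) = true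
      · simp only [hc, if_true]
        rw [ih _ _ (cur.reverse :: acc), ih _ _ ([cur.reverse])]
        simp
      · simp only [eq_false_of_ne_true hc, if_false]
        exact ih rest (c :: cur) acc

theorem pvGoSeg : ∀ (seg : List Char) (fuel : Nat) (rest cur : List Char) (acc : List (List Char)),
    ('/' : Char) ∉ seg → seg.length + 1 ≤ fuel →
    PySem.Chars.splitOn.go ['/'] fuel (seg ++ '/' :: rest) cur acc =
      PySem.Chars.splitOn.go ['/'] (fuel - seg.length - 1) rest [] ((cur.reverse ++ seg) :: acc) := by
  intro seg
  induction seg with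
  | nil =>
    intro fuel rest cur acc _ hlen
    cases fuel with
    | zero => simp at hlen
    | succ f =>
      rw [PySem.Chars.splitOn.go.eq_def]
      have : (['/'] : List Char).isPrefixOf ('/' :: rest) = true := by simp [List.isPrefixOf]
      simp [this]
  | cons c cs ih =>
    intro fuel rest cur acc hmem hlen
    cases fuel with
    | zero => simp at hlen
    | succ f =>
      have hc : c ≠ '/' := fun h => hmem (h ▸ List.mem_cons_self)
      rw [PySem.Chars.splitOn.go.eq_def]
      have hpre : (['/'] : List Char).isPrefixOf (c :: (cs ++ '/' :: rest)) = false := by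
        simp [List.isPrefixOf]
        exact fun h => absurd h.symm hc
      simp only [List.cons_append, hpre, Bool.false_eq_true, if_false]
      rw [ih f rest (c :: cur) acc (fun h => hmem (List.mem_cons_of_mem _ h)) (by simp at hlen; omega)]
      simp

theorem pvSplitOn_no_sep (cs : List Char) (h : ('/' : Char) ∉ cs) :
    PySem.Chars.splitOn cs ['/'] = [cs] := by
  unfold PySem.Chars.splitOn
  rw [pvGoNoSep cs (cs.length + 1) [] [] h (by omega)]
  simp

theorem pvSplitOn_cons (seg rest : List Char) (h : ('/' : Char) ∉ seg) :
    PySem.Chars.splitOn (seg ++ '/' :: rest) ['/'] = seg :: PySem.Chars.splitOn rest ['/'] := by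
  unfold PySem.Chars.splitOn
  rw [pvGoSeg seg _ rest [] [] h (by simp)]
  have hf : (seg ++ '/' :: rest).length + 1 - seg.length - 1 = rest.length + 1 := by simp; omega
  rw [hf, pvGoAcc]
  simp
-- small find facts
theorem pvFindNegOfNotIn (s sub : List Char) (h : ¬ PySem.Chars.isIn sub s = true) :
    PySem.Chars.find s sub = -1 := by
  rw [PySem.Chars.find_eq_neg_one_iff]
  intro hinf
  exact h ((PySem.Chars.isIn_iff_infix sub s).mpr hinf)

theorem pvFindNonnegOfNe (s sub : List Char) (h : PySem.Chars.find s sub ≠ -1) :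
    0 ≤ PySem.Chars.find s sub := by
  by_cases hinf : sub <:+: s
  · exact (PySem.Chars.find_nonneg_iff s sub).mpr hinf
  · exact absurd ((PySem.Chars.find_eq_neg_one_iff s sub).mpr hinf) h

-- the no-'/' base case of the main invariant
theorem pvNoSlashCase (s : List Char) (h : ('/' : Char) ∉ s) :
    (pvAcore s = pvBcore s) ∧
    (pvAFirst (PySem.Chars.splitOn s ['/']) = none ↔ PySem.Chars.find s pvPat = -1) ∧
    (∀ l, pvAFirst (PySem.Chars.splitOn s ['/']) = some l →
      (l = [] ↔ PySem.Chars.rfind (s.take (PySem.Chars.find s pvPat).toNat) ['/'] = -1)) := by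
  rw [pvSplitOn_no_sep s h]
  by_cases hin : PySem.Chars.isIn pvPat s = true
  · have hne : PySem.Chars.find s pvPat ≠ -1 := by
      rw [Ne, PySem.Chars.find_eq_neg_one_iff]
      simp only [not_not]
      exact (PySem.Chars.isIn_iff_infix pvPat s).mp hin
    have h0 : 0 ≤ PySem.Chars.find s pvPat := pvFindNonnegOfNe s pvPat hne
    have hrf : PySem.Chars.rfind (s.take (PySem.Chars.find s pvPat).toNat) ['/'] = -1 :=
      pvRfindNone _ (fun hmem => h (List.take_subset _ s hmem))
    refine ⟨?_, ?_, ?_⟩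
    · show pvAcore s = pvBcore s
      unfold pvAcore pvBcore
      rw [pvSplitOn_no_sep s h]
      simp only [pvAFirst, hin, if_pos]
      rw [pvRfindFromTake s _ h0 (PySem.Chars.find_le_length s _), hrf]
      rw [if_neg hne, if_pos rfl]
      simp [PySem.Chars.join, List.intercalate]
    · simp [pvAFirst, hin, hne]
    · intro l hl
      simp only [pvAFirst, hin, if_pos] at hl
      cases hl
      simp [hrf]
  · have hfe : PySem.Chars.find s pvPat = -1 := pvFindNegOfNotIn s pvPat hin
    refine ⟨?_, ?_, ?_⟩
    · show pvAcore s = pvBcore s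
      unfold pvAcore pvBcore
      rw [pvSplitOn_no_sep s h]
      simp only [pvAFirst, hin, if_neg]
      rw [hfe]
      simp [hin]
    · simp [pvAFirst, hin, hfe]
    · intro l hl
      simp [pvAFirst, hin] at hl

-- the inductive step for a string of the form seg ++ '/' :: rest
theorem pvStepCase (seg rest : List Char) (hsm : ('/' : Char) ∉ seg)
    (IH : (pvAcore rest = pvBcore rest) ∧
      (pvAFirst (PySem.Chars.splitOn rest ['/']) = none ↔ PySem.Chars.find rest pvPat = -1) ∧
      (∀ l, pvAFirst (PySem.Chars.splitOn rest ['/']) = some l →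
        (l = [] ↔ PySem.Chars.rfind (rest.take (PySem.Chars.find rest pvPat).toNat) ['/'] = -1))) :
    (pvAcore (seg ++ '/' :: rest) = pvBcore (seg ++ '/' :: rest)) ∧
    (pvAFirst (PySem.Chars.splitOn (seg ++ '/' :: rest) ['/']) = none ↔
      PySem.Chars.find (seg ++ '/' :: rest) pvPat = -1) ∧
    (∀ l, pvAFirst (PySem.Chars.splitOn (seg ++ '/' :: rest) ['/']) = some l →
      (l = [] ↔ PySem.Chars.rfind ((seg ++ '/' :: rest).take
        (PySem.Chars.find (seg ++ '/' :: rest) pvPat).toNat) ['/'] = -1)) := by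
  obtain ⟨ih1, ih2, ih3⟩ := IH
  have hpatne : pvPat ≠ [] := by decide
  have hpatsl : ('/' : Char) ∉ pvPat := by decide
  have hsplit := pvSplitOn_cons seg rest hsm
  by_cases hin : PySem.Chars.isIn pvPat seg = true
  · -- the match is inside the first segment: both sides return "/"
    obtain ⟨h0, hle⟩ := pvFindInSeg pvPat seg rest hpatne ((PySem.Chars.isIn_iff_infix pvPat seg).mp hin)
    have hne : PySem.Chars.find (seg ++ '/' :: rest) pvPat ≠ -1 := by omega
    have htk : (seg ++ '/' :: rest).take (PySem.Chars.find (seg ++ '/' :: rest) pvPat).toNat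
        = seg.take (PySem.Chars.find (seg ++ '/' :: rest) pvPat).toNat := by
      rw [List.take_append, Nat.sub_eq_zero_of_le hle, List.take_zero, List.append_nil]
    have hrf : PySem.Chars.rfind ((seg ++ '/' :: rest).take
        (PySem.Chars.find (seg ++ '/' :: rest) pvPat).toNat) ['/'] = -1 := by
      rw [htk]
      exact pvRfindNone _ (fun hmem => hsm (List.take_subset _ seg hmem))
    refine ⟨?_, ?_, ?_⟩
    · unfold pvAcore pvBcore
      rw [hsplit]
      simp only [pvAFirst, hin, if_pos]
      rw [pvRfindFromTake _ _ h0 (PySem.Chars.find_le_length _ _), hrf]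
      rw [if_neg hne, if_pos rfl]
      simp [PySem.Chars.join, List.intercalate]
    · rw [hsplit]
      simp [pvAFirst, hin, hne]
    · intro l hl
      rw [hsplit] at hl
      simp only [pvAFirst, hin, if_pos] at hl
      cases hl
      simp [hrf]
  · have hnotinf : ¬ pvPat <:+: seg := fun hh => hin ((PySem.Chars.isIn_iff_infix pvPat seg).mpr hh)
    have hfa := pvFindAppend pvPat seg rest hpatsl hnotinf
    by_cases hrm : PySem.Chars.find rest pvPat = -1
    · have hfs : PySem.Chars.find (seg ++ '/' :: rest) pvPat = -1 := by rw [hfa, if_pos hrm]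
      have hnone : pvAFirst (PySem.Chars.splitOn rest ['/']) = none := ih2.mpr hrm
      refine ⟨?_, ?_, ?_⟩
      · unfold pvAcore pvBcore
        rw [hsplit, hfs]
        simp [pvAFirst, hin, hnone]
      · rw [hsplit]
        simp [pvAFirst, hin, hnone, hfs]
      · intro l hl
        rw [hsplit] at hl
        simp [pvAFirst, hin, hnone] at hl
    · have hm0 : 0 ≤ PySem.Chars.find rest pvPat := pvFindNonnegOfNe rest pvPat hrm
      have hfs : PySem.Chars.find (seg ++ '/' :: rest) pvPat
          = (seg.length : Int) + 1 + PySem.Chars.find rest pvPat := by rw [hfa, if_neg hrm]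
      have hfs_ne : PySem.Chars.find (seg ++ '/' :: rest) pvPat ≠ -1 := by omega
      obtain ⟨l, hl⟩ : ∃ l, pvAFirst (PySem.Chars.splitOn rest ['/']) = some l := by
        cases h : pvAFirst (PySem.Chars.splitOn rest ['/']) with
        | none => exact absurd (ih2.mp h) hrm
        | some l => exact ⟨l, rfl⟩
      set m := (PySem.Chars.find rest pvPat).toNat with hmdef
      have hmle : m ≤ rest.length := by
        have := PySem.Chars.find_le_length rest pvPat
        omega
      have htoNat : (PySem.Chars.find (seg ++ '/' :: rest) pvPat).toNat = seg.length + (m + 1) := by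
        omega
      have htake : (seg ++ '/' :: rest).take (PySem.Chars.find (seg ++ '/' :: rest) pvPat).toNat
          = seg ++ '/' :: rest.take m := by
        rw [htoNat, List.take_append, List.take_of_length_le (by omega)]
        congr 1
        have : seg.length + (m + 1) - seg.length = m + 1 := by omega
        rw [this, List.take_succ_cons]
      set r := PySem.Chars.rfind (rest.take m) ['/'] with hrdef
      have hrge : -1 ≤ r := pvRfindGe _
      have hrfj : PySem.Chars.rfind ((seg ++ '/' :: rest).take
          (PySem.Chars.find (seg ++ '/' :: rest) pvPat).toNat) ['/'] = (seg.length : Int) + 1 + r := by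
        rw [htake, pvRfindAppend]
      have hjfrom : PySem.Chars.rfindFrom (seg ++ '/' :: rest) ['/'] 0
          (some (PySem.Chars.find (seg ++ '/' :: rest) pvPat)) = (seg.length : Int) + 1 + r := by
        rw [pvRfindFromTake _ _ (by omega) (PySem.Chars.find_le_length _ _), hrfj]
      have hjne : (seg.length : Int) + 1 + r ≠ -1 := by omega
      have hjfrom_rest : PySem.Chars.rfindFrom rest ['/'] 0 (some (PySem.Chars.find rest pvPat)) = r := by
        rw [pvRfindFromTake rest _ hm0 (PySem.Chars.find_le_length _ _)]
      by_cases hr1 : r = -1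
      · have hlnil : l = [] := (ih3 l hl).mpr hr1
        subst hlnil
        refine ⟨?_, ?_, ?_⟩
        · unfold pvAcore pvBcore
          rw [hsplit]
          simp only [pvAFirst, hin, hl, Option.map_some, Bool.false_eq_true, if_false]
          rw [if_neg hfs_ne, hjfrom, hr1]
          rw [if_neg (by omega : ¬ (seg.length : Int) + 1 + -1 = -1)]
          rw [PySem.Chars.join_singleton]
          have h1 : (seg.length : Int) + 1 + -1 + 1 = ((seg.length + 1 : Nat) : Int) := by push_cast; ring
          rw [h1, PySem.List.slice_to _ (by omega), Int.toNat_natCast]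
          rw [List.take_append, List.take_of_length_le (by omega)]
          have h2 : seg.length + 1 - seg.length = 1 := by omega
          rw [h2]
          simp
        · rw [hsplit]
          simp [pvAFirst, hin, hl, hfs_ne]
        · intro l0 hl0
          rw [hsplit] at hl0
          simp only [pvAFirst, hin, hl, Option.map_some, Bool.false_eq_true, if_false] at hl0
          cases hl0
          rw [hrfj]
          constructor
          · intro h; simp at h
          · intro h; omega
      · have hr0 : 0 ≤ r := by omega
        obtain ⟨q, l', hql⟩ : ∃ q l', l = q :: l' := by
          cases l with
          | nil => exact absurd ((ih3 [] hl).mp rfl) hr1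
          | cons q l' => exact ⟨q, l', rfl⟩
        subst hql
        have hArest : pvAcore rest = PySem.Chars.join ['/'] (q :: l') ++ ['/'] := by
          unfold pvAcore
          rw [hl]
        have hBrest : pvBcore rest = rest.take (r.toNat + 1) := by
          unfold pvBcore
          rw [if_neg hrm, hjfrom_rest, if_neg hr1, PySem.List.slice_to _ (by omega)]
          congr 1
          omega
        have hAB : PySem.Chars.join ['/'] (q :: l') ++ ['/'] = rest.take (r.toNat + 1) := by
          rw [← hArest, ← hBrest]; exact ih1
        refine ⟨?_, ?_, ?_⟩
        · unfold pvAcore pvBcore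
          rw [hsplit]
          simp only [pvAFirst, hin, hl, Option.map_some, Bool.false_eq_true, if_false]
          rw [if_neg hfs_ne, hjfrom]
          rw [if_neg hjne, PySem.List.slice_to _ (by omega)]
          have h1 : ((seg.length : Int) + 1 + r + 1).toNat = seg.length + (r.toNat + 1 + 1) := by omega
          rw [h1, List.take_append, List.take_of_length_le (by omega)]
          have h2 : seg.length + (r.toNat + 1 + 1) - seg.length = r.toNat + 1 + 1 := by omega
          rw [h2, List.take_succ_cons]
          rw [PySem.Chars.join_cons_cons]
          simp only [List.append_assoc, List.cons_append]
          rw [hAB]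
          simp
        · rw [hsplit]
          simp [pvAFirst, hin, hl, hfs_ne]
        · intro l0 hl0
          rw [hsplit] at hl0
          simp only [pvAFirst, hin, hl, Option.map_some, Bool.false_eq_true, if_false] at hl0
          cases hl0
          rw [hrfj]
          constructor
          · intro h; simp at h
          · intro h; omega

theorem pvMainAux : ∀ (N : Nat) (s : List Char), s.length ≤ N →
    (pvAcore s = pvBcore s) ∧
    (pvAFirst (PySem.Chars.splitOn s ['/']) = none ↔ PySem.Chars.find s pvPat = -1) ∧
    (∀ l, pvAFirst (PySem.Chars.splitOn s ['/']) = some l →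
      (l = [] ↔ PySem.Chars.rfind (s.take (PySem.Chars.find s pvPat).toNat) ['/'] = -1)) := by
  intro N
  induction N with
  | zero =>
    intro s hlen
    have hs : s = [] := List.eq_nil_of_length_eq_zero (Nat.le_zero.mp hlen)
    subst hs
    exact pvNoSlashCase [] (by simp)
  | succ N ih =>
    intro s hlen
    by_cases hmem : ('/' : Char) ∈ s
    · obtain ⟨seg, rest, hsm, hs⟩ : ∃ seg rest, ('/' : Char) ∉ seg ∧ s = seg ++ '/' :: rest := by
        have hdw : s.dropWhile (fun c => c != '/') ≠ [] := by
          intro hnil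
          rw [List.dropWhile_eq_nil_iff] at hnil
          simpa using hnil '/' hmem
        obtain ⟨c, rest, hcr⟩ := List.exists_cons_of_ne_nil hdw
        have hh : (s.dropWhile (fun c => c != '/')).head? = some c := by rw [hcr]; rfl
        have hco : (s.dropWhile (fun c => c != '/')).head hdw = c :=
          Option.some.inj ((List.head?_eq_head hdw).symm.trans hh)
        have hc : c = '/' := by
          have h1 := List.head_dropWhile_not (fun c => c != '/') hdw
          rw [hco] at h1
          simpa using h1
        subst hc
        refine ⟨s.takeWhile (fun c => c != '/'), rest, ?_, ?_⟩
        · intro hmem2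
          simpa using List.mem_takeWhile_imp hmem2
        · conv_lhs => rw [← List.takeWhile_append_dropWhile (p := fun c => c != '/') (l := s)]
          rw [hcr]
      subst hs
      have hrlen : rest.length ≤ N := by
        simp at hlen
        omega
      exact pvStepCase seg rest hsm (ih rest hrlen)
    · exact pvNoSlashCase s hmem

theorem pvAloopAcore (s : List Char) :
    pvAloop (PySem.Chars.splitOn s ['/']) (PySem.List.enumerate (PySem.Chars.splitOn s ['/']) 0)
      = pvAcore s := by
  have h := pvAloop_eq (PySem.Chars.splitOn s ['/']) []
  simp only [List.nil_append, List.length_nil, Nat.cast_zero] at h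
  rw [h]
  unfold pvAcore
  cases pvAFirst (PySem.Chars.splitOn s ['/']) <;> rfl

theorem pvMain (s : List Char) : pvAcore s = pvBcore s := (pvMainAux s.length s (Nat.le_refl _)).1

-- ===== VERDICT (by name: the statement is the Claim_ definition above) =====
theorem get_player_playlist_spec : Claim_equal_get_player_playlist := by
  unfold Claim_equal_get_player_playlist
  intro url _
  unfold Spec_get_player_playlist get_player_playlist get_player_playlist_alt
  show String.ofList (pvAloop
      (PySem.Chars.splitOn (if PySem.Chars.endswith url.toList ['/'] then PySem.List.slice url.toList none (some (-1)) else url.toList) ['/'])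
      (PySem.List.enumerate (PySem.Chars.splitOn (if PySem.Chars.endswith url.toList ['/'] then PySem.List.slice url.toList none (some (-1)) else url.toList) ['/']) 0))
    = String.ofList (pvBcore (if PySem.Chars.endswith url.toList ['/'] then PySem.List.slice url.toList none (some (-1)) else url.toList))
  rw [pvAloopAcore, pvMain]
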